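-- pv_equiv track=rewrite | github.com/vosslab/sports-life-game | tools/extract_avataaars.py | apply_color_replacements
-- ===== SOURCE A (Python) =====
-- SKIN_COLORS = ['#FD9841', '#F9D562', '#FFDBB4', '#EDB98A', '#D08B5B', '#AE5D29', '#614335']
--
-- def apply_color_replacements(svg_str, category_name):
-- 	# Apply color replacements based on category
-- 	result = svg_str
--
-- 	if category_name == 'skin':
-- 		# Replace all skin hex colors with placeholder
-- 		for skin_hex in SKIN_COLORS:
-- 			result = result.replace(skin_hex, 'SKIN_PLACEHOLDER')
-- 		# Replace ${color} with SKIN_PLACEHOLDER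
-- 		result = result.replace('${color}', 'SKIN_PLACEHOLDER')
--
-- 	elif category_name == 'facialHair':
-- 		# Replace ${color} with HAIR_PLACEHOLDER
-- 		result = result.replace('${color}', 'HAIR_PLACEHOLDER')
--
-- 	elif category_name == 'top':
-- 		# Replace ${hairColor} with HAIR_PLACEHOLDER
-- 		result = result.replace('${hairColor}', 'HAIR_PLACEHOLDER')
-- 		# Replace ${hatColor} with literal gray (ignored for headshots)
-- 		result = result.replace('${hatColor}', '#262E33')
-- 		# Also replace skin hex values in hair styles
-- 		for skin_hex in SKIN_COLORS:
-- 			result = result.replace(skin_hex, 'SKIN_PLACEHOLDER')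
--
-- 	elif category_name == 'accessories':
-- 		# Replace ${color} with literal gray
-- 		result = result.replace('${color}', '#929598')
--
-- 	# Generic: replace template literals in other categories if any
-- 	result = result.replace('${color}', '#929598')
--
-- 	return result
-- ===== SOURCE B (Python) =====
-- SKIN_COLORS = ['#FD9841', '#F9D562', '#FFDBB4', '#EDB98A', '#D08B5B', '#AE5D29', '#614335']
--
-- # Ordered replacement rules per category (priority order, generic rule appended at scan time).
-- CATEGORY_RULES = {
--     'skin': [(h, 'SKIN_PLACEHOLDER') for h in SKIN_COLORS] + [('${color}', 'SKIN_PLACEHOLDER')],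
--     'facialHair': [('${color}', 'HAIR_PLACEHOLDER')],
--     'top': [('${hairColor}', 'HAIR_PLACEHOLDER'), ('${hatColor}', '#262E33')]
--            + [(h, 'SKIN_PLACEHOLDER') for h in SKIN_COLORS],
--     'accessories': [('${color}', '#929598')],
-- }
--
-- def apply_color_replacements(svg_str, category_name):
--     # One left-to-right scan: at each position take the first rule whose pattern
--     # matches there (rules are non-overlapping and never match inside inserted
--     # text, so this equals applying the replacements as successive passes).
--     rules = CATEGORY_RULES.get(category_name, []) + [('${color}', '#929598')]
--     out = []
--     i = 0
--     n = len(svg_str)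
--     while i < n:
--         for old, new in rules:
--             if svg_str.startswith(old, i):
--                 out.append(new)
--                 i += len(old)
--                 break
--         else:
--             out.append(svg_str[i])
--             i += 1
--     return ''.join(out)
-- ===== Notes on version B (the rewrite author's own statement) =====
-- stated objective: alternative
-- what changed: B replaces A's sequence of up to nine full-string str.replace passes by ONE left-to-right scan that, at each position, applies the first matching rule from the category's ordered rule list; this is correct because the patterns never overlap each other and never match inside or across inserted replacement text, which the Lean proof establishes.
import Mathlib
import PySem

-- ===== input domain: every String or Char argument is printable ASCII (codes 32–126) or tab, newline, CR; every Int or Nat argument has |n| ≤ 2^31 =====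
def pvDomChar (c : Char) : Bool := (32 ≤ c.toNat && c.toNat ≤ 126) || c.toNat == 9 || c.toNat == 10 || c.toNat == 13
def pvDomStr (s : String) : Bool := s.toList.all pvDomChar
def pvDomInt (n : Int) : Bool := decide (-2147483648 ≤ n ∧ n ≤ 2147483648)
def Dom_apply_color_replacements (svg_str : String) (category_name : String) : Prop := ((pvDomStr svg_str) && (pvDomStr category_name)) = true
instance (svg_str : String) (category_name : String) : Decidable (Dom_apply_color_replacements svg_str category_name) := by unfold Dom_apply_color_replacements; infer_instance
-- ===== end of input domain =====

-- B replaces A's sequence of full-string replace passes by one left-to-right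
-- multi-pattern scan (first matching rule wins at each position); equivalence
-- is proved from non-interference of the patterns (objective: alternative).

-- ===== PORT A =====
def pvSkinColors : List String :=
  ["#FD9841", "#F9D562", "#FFDBB4", "#EDB98A", "#D08B5B", "#AE5D29", "#614335"]

def apply_color_replacements (svg_str : String) (category_name : String) : String :=
  let result := svg_str
  let result :=
    if category_name == "skin" then
      let result := pvSkinColors.foldl (fun r h => PySem.Str.replace r h "SKIN_PLACEHOLDER") result
      PySem.Str.replace result "${color}" "SKIN_PLACEHOLDER"
    else if category_name == "facialHair" then
      PySem.Str.replace result "${color}" "HAIR_PLACEHOLDER"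
    else if category_name == "top" then
      let result := PySem.Str.replace result "${hairColor}" "HAIR_PLACEHOLDER"
      let result := PySem.Str.replace result "${hatColor}" "#262E33"
      pvSkinColors.foldl (fun r h => PySem.Str.replace r h "SKIN_PLACEHOLDER") result
    else if category_name == "accessories" then
      PySem.Str.replace result "${color}" "#929598"
    else result
  PySem.Str.replace result "${color}" "#929598"

-- ===== PORT B =====
-- dict: category -> ordered list of (old, new) rules (Source B's CATEGORY_RULES)
def pvCategoryRules : PySem.Dict String (List (String × String)) :=
  PySem.Dict.mk
    [ ("skin", pvSkinColors.map (fun h => (h, "SKIN_PLACEHOLDER")) ++ [("${color}", "SKIN_PLACEHOLDER")])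
    , ("facialHair", [("${color}", "HAIR_PLACEHOLDER")])
    , ("top", [("${hairColor}", "HAIR_PLACEHOLDER"), ("${hatColor}", "#262E33")]
              ++ pvSkinColors.map (fun h => (h, "SKIN_PLACEHOLDER")))
    , ("accessories", [("${color}", "#929598")]) ]

-- Source B's `while i < n` scan, ported on the character list with fuel = length:
-- at each position the FIRST rule whose pattern matches there is applied (for/else).
def pvScanGo (rules : List (List Char × List Char)) : Nat → List Char → List Char
  | 0, _ => []
  | _ + 1, [] => []
  | fuel + 1, c :: t =>
    match rules.find? (fun p => p.1.isPrefixOf (c :: t)) with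
    | some (o, nw) => nw ++ pvScanGo rules fuel ((c :: t).drop o.length)
    | none => c :: pvScanGo rules fuel t

def apply_color_replacements_alt (svg_str : String) (category_name : String) : String :=
  let rules := (pvCategoryRules.getD category_name []) ++ [("${color}", "#929598")]
  let rcs := rules.map (fun p => (p.1.toList, p.2.toList))
  String.ofList (pvScanGo rcs svg_str.toList.length svg_str.toList)

-- ===== PRECONDITION & SPEC =====
def Spec_apply_color_replacements (svg_str : String) (category_name : String) (out : String) : Prop := out = apply_color_replacements_alt svg_str category_name
instance (svg_str : String) (category_name : String) (out : String) : Decidable (Spec_apply_color_replacements svg_str category_name out) := by unfold Spec_apply_color_replacements; infer_instance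

-- ===== CLAIM =====
def Claim_equal_apply_color_replacements : Prop := ∀ (svg_str : String) (category_name : String), Dom_apply_color_replacements svg_str category_name → Spec_apply_color_replacements svg_str category_name (apply_color_replacements svg_str category_name)

-- ===== LEMMAS AND PROOFS =====

-- scanner with fuel = exact length (the form B uses)
def scanS (R : List (List Char × List Char)) (l : List Char) : List Char :=
  pvScanGo R l.length l

-- all patterns nonempty
def NE (R : List (List Char × List Char)) : Prop := ∀ p ∈ R, p.1 ≠ []

-- non-interference conditions, as decidable booleans:
-- noFit a b: neither of a, b is a prefix of the other
def noFit (a b : List Char) : Bool := !(a.isPrefixOf b || b.isPrefixOf a)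
-- clearB n pats: no pattern aligns with any nonempty suffix of inserted text n
def clearB (n : List Char) (pats : List (List Char)) : Bool :=
  pats.all (fun p => (List.range n.length).all (fun k => noFit p (n.drop k)))
-- hyp3B o n pats: no proper nonempty suffix of a pattern aligns with o or with n
def hyp3B (o n : List Char) (pats : List (List Char)) : Bool :=
  pats.all (fun p => (List.range p.length).all (fun k =>
    k == 0 || (noFit o (p.drop k) && noFit n (p.drop k))))
def goodB : List (List Char × List Char) → Bool
  | [] => true
  | (o, nw) :: R => (!o.isEmpty) && (!nw.isEmpty) && clearB nw (R.map (·.1))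
      && hyp3B o nw (R.map (·.1)) && goodB R

theorem noFit_spec {a b : List Char} (h : noFit a b = true) : ¬ a <+: b ∧ ¬ b <+: a := by
  simp only [noFit, Bool.not_eq_eq_eq_not, Bool.not_true, Bool.or_eq_false_iff] at h
  constructor
  · intro hp; rw [← List.isPrefixOf_iff_prefix] at hp; rw [hp] at h; exact absurd h.1 (by simp)
  · intro hp; rw [← List.isPrefixOf_iff_prefix] at hp; rw [hp] at h; exact absurd h.2 (by simp)

theorem clearB_spec {n : List Char} {pats : List (List Char)} (h : clearB n pats = true)
    {p : List Char} (hp : p ∈ pats) {k : Nat} (hk : k < n.length) :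
    ¬ p <+: n.drop k ∧ ¬ n.drop k <+: p := by
  have := (List.all_eq_true.1 h) p hp
  exact noFit_spec ((List.all_eq_true.1 this) k (List.mem_range.2 hk))

theorem hyp3B_spec {o n : List Char} {pats : List (List Char)} (h : hyp3B o n pats = true)
    {p : List Char} (hp : p ∈ pats) {k : Nat} (hk1 : 1 ≤ k) (hk2 : k < p.length) :
    (¬ o <+: p.drop k ∧ ¬ p.drop k <+: o) ∧ (¬ n <+: p.drop k ∧ ¬ p.drop k <+: n) := by
  have := (List.all_eq_true.1 ((List.all_eq_true.1 h) p hp)) k (List.mem_range.2 hk2)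
  have hk0 : (k == 0) = false := by simp; omega
  rw [hk0, Bool.false_or, Bool.and_eq_true] at this
  exact ⟨noFit_spec this.1, noFit_spec this.2⟩

theorem good_NE {R : List (List Char × List Char)} (h : goodB R = true) : NE R := by
  induction R with
  | nil => intro p hp; simp at hp
  | cons r R ih =>
    obtain ⟨o, nw⟩ := r
    simp only [goodB, Bool.and_eq_true] at h
    intro p hp
    rcases List.mem_cons.1 hp with h1 | h2
    · subst h1; simpa [List.isEmpty_iff] using h.1.1.1.1
    · exact ih h.2 p h2

theorem good_tail {r : List Char × List Char} {R : List (List Char × List Char)}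
    (h : goodB (r :: R) = true) : goodB R = true := by
  obtain ⟨o, nw⟩ := r
  simp only [goodB, Bool.and_eq_true] at h
  exact h.2

-- fuel irrelevance: with nonempty patterns any fuel ≥ length gives the same scan
theorem scan_fuel {R : List (List Char × List Char)} (hne : NE R) :
    ∀ fuel fuel' l, l.length ≤ fuel → l.length ≤ fuel' →
      pvScanGo R fuel l = pvScanGo R fuel' l := by
  intro fuel
  induction fuel with
  | zero =>
    intro fuel' l h1 _
    have : l = [] := List.eq_nil_of_length_eq_zero (Nat.le_zero.1 h1)
    subst this; cases fuel' <;> rfl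
  | succ fuel ih =>
    intro fuel' l h1 h2
    cases l with
    | nil => cases fuel' <;> rfl
    | cons c t =>
      cases fuel' with
      | zero => simp at h2
      | succ fuel' =>
        simp only [List.length_cons] at h1 h2
        simp only [pvScanGo]
        cases hfind : R.find? (fun p => p.1.isPrefixOf (c :: t)) with
        | none =>
          have ht : t.length ≤ fuel := by simpa using Nat.succ_le_succ_iff.1 h1
          have ht' : t.length ≤ fuel' := by simpa using Nat.succ_le_succ_iff.1 h2
          simp [ih fuel' t ht ht']
        | some r =>
          obtain ⟨o, nw⟩ := r
          have ho : o ≠ [] := hne (o, nw) (List.mem_of_find?_eq_some hfind)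
          have hol : 1 ≤ o.length := by
            cases o with | nil => exact absurd rfl ho | cons _ _ => simp
          have hd : ((c :: t).drop o.length).length ≤ fuel := by
            simp only [List.length_drop, List.length_cons]
            omega
          have hd' : ((c :: t).drop o.length).length ≤ fuel' := by
            simp only [List.length_drop, List.length_cons]
            omega
          simp [ih fuel' _ hd hd']

-- step equations for scanS
theorem scanS_some {R : List (List Char × List Char)} (hne : NE R) {l : List Char}
    {o nw : List Char} (h : R.find? (fun p => p.1.isPrefixOf l) = some (o, nw)) :
    scanS R l = nw ++ scanS R (l.drop o.length) := by
  have ho : o ≠ [] := hne (o, nw) (List.mem_of_find?_eq_some h)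
  cases l with
  | nil =>
    exfalso
    have := List.find?_some h
    have := List.isPrefixOf_iff_prefix.1 this
    exact ho (List.prefix_nil.1 this)
  | cons c t =>
    have hol : 1 ≤ o.length := by
      cases o with | nil => exact absurd rfl ho | cons _ _ => simp
    show pvScanGo R (t.length + 1) (c :: t) = _
    simp only [pvScanGo, h]
    congr 1
    exact scan_fuel hne t.length _ _
      (by simp only [List.length_drop, List.length_cons]; omega)
      (le_refl _)

theorem scanS_none {R : List (List Char × List Char)} {c : Char} {t : List Char}
    (h : R.find? (fun p => p.1.isPrefixOf (c :: t)) = none) :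
    scanS R (c :: t) = c :: scanS R t := by
  show pvScanGo R (t.length + 1) (c :: t) = _
  simp only [pvScanGo, h]
  rfl

theorem scanS_empty_rules (l : List Char) : scanS [] l = l := by
  induction l with
  | nil => rfl
  | cons c t ih => rw [scanS_none (by simp), ih]

-- replace.go = single-rule scan (with the accumulator made explicit)
theorem replace_go_eq {o : List Char} (n : List Char) (ho : o ≠ []) :
    ∀ fuel l acc, l.length ≤ fuel →
      PySem.Chars.replace.go o n fuel l acc = acc.reverse ++ scanS [(o, n)] l := by
  have hol : 1 ≤ o.length := by
    cases o with | nil => exact absurd rfl ho | cons _ _ => simp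
  have hne : NE [(o, n)] := by intro p hp; simp at hp; rw [hp]; exact ho
  intro fuel
  induction fuel with
  | zero =>
    intro l acc h1
    have : l = [] := List.eq_nil_of_length_eq_zero (Nat.le_zero.1 h1)
    subst this; simp [PySem.Chars.replace.go, scanS, pvScanGo]
  | succ fuel ih =>
    intro l acc h1
    cases l with
    | nil => simp [PySem.Chars.replace.go, scanS, pvScanGo]
    | cons c t =>
      simp only [List.length_cons] at h1
      by_cases hp : o.isPrefixOf (c :: t)
      · have hfind : ([(o, n)]).find? (fun p => p.1.isPrefixOf (c :: t)) = some (o, n) :=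
          List.find?_cons_of_pos (by simpa using hp)
        rw [scanS_some hne hfind]
        simp only [PySem.Chars.replace.go, hp, if_true]
        rw [ih _ (n.reverse ++ acc)
          (by simp only [List.length_drop, List.length_cons]; omega)]
        simp
      · have hfind : ([(o, n)]).find? (fun p => p.1.isPrefixOf (c :: t)) = none := by
          rw [List.find?_eq_none]; intro p hpm; simp at hpm; rw [hpm]; simpa using hp
        rw [scanS_none hfind]
        simp only [PySem.Chars.replace.go, hp]
        rw [ih t (c :: acc) (by simpa using Nat.succ_le_succ_iff.1 h1)]
        simp

-- one replace pass = single-rule scan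
theorem replace_eq_scan {o : List Char} (n l : List Char) (ho : o ≠ []) :
    PySem.Chars.replace l o n = scanS [(o, n)] l := by
  have hoe : o.isEmpty = false := by simp [ho]
  rw [PySem.Chars.replace, hoe]
  simpa using replace_go_eq n ho l.length l [] (le_refl _)

-- scanning straight through inserted text n (Clear condition)
theorem scan_through {R : List (List Char × List Char)} {n : List Char}
    (hc : clearB n (R.map (·.1)) = true) (y : List Char) :
    scanS R (n ++ y) = n ++ scanS R y := by
  induction n with
  | nil => simp
  | cons c t ih =>
    have hfind : R.find? (fun p => p.1.isPrefixOf (c :: (t ++ y))) = none := by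
      rw [List.find?_eq_none]
      intro p hpm
      simp only [List.isPrefixOf_iff_prefix]
      intro hpre
      have hct : (c :: t) <+: (c :: t) ++ y := List.prefix_append _ _
      have hcmp := List.prefix_or_prefix_of_prefix (by simpa using hpre) hct
      have hcl := clearB_spec hc (List.mem_map_of_mem hpm) (k := 0) (by simp)
      simp only [List.drop_zero] at hcl
      rcases hcmp with h | h
      · exact hcl.1 h
      · exact hcl.2 h
    have hct : clearB t (R.map (·.1)) = true := by
      simp only [clearB, List.all_eq_true] at hc ⊢
      intro p hp k hk
      have := hc p hp (k + 1) (by simp at hk ⊢; omega)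
      simpa using this
    calc scanS R ((c :: t) ++ y) = c :: scanS R (t ++ y) := scanS_none (by simpa using hfind)
      _ = c :: (t ++ scanS R y) := by rw [ih hct]
      _ = (c :: t) ++ scanS R y := rfl

-- a single-rule scan copies the input verbatim across match-free positions
theorem scan_skip {o n : List Char} (ho : o ≠ []) :
    ∀ k l, k ≤ l.length → (∀ j < k, ¬ o <+: l.drop j) →
      scanS [(o, n)] l = l.take k ++ scanS [(o, n)] (l.drop k) := by
  intro k
  induction k with
  | zero => intro l _ _; simp
  | succ k ih =>
    intro l hk hfree
    cases l with
    | nil => simp at hk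
    | cons c t =>
      have h0 : ¬ o <+: (c :: t) := by simpa using hfree 0 (Nat.succ_pos _)
      have hfind : ([(o, n)]).find? (fun p => p.1.isPrefixOf (c :: t)) = none := by
        rw [List.find?_eq_none]; intro p hpm; simp at hpm; rw [hpm]
        simpa [List.isPrefixOf_iff_prefix] using h0
      rw [scanS_none hfind]
      rw [ih t (by simpa using Nat.succ_le_succ_iff.1 hk)
        (fun j hj => by simpa using hfree (j + 1) (by omega))]
      simp

-- prefixes of a single-rule-scanned string: prefixes of the source, or aligned with n
theorem scan_prefix {o n : List Char} (ho : o ≠ []) :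
    ∀ l u, u ≠ [] → u <+: scanS [(o, n)] l →
      u <+: l ∨ ∃ k < u.length, (u.drop k <+: n ∨ n <+: u.drop k) := by
  intro l
  induction l with
  | nil =>
    intro u hu hp
    rw [show scanS [(o, n)] [] = [] from rfl] at hp
    exact absurd (List.prefix_nil.1 hp) hu
  | cons c t ih =>
    intro u hu hp
    by_cases hm : o.isPrefixOf (c :: t)
    · right
      refine ⟨0, by cases u with | nil => exact absurd rfl hu | cons _ _ => simp, ?_⟩
      have hfind : ([(o, n)]).find? (fun p => p.1.isPrefixOf (c :: t)) = some (o, n) :=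
        List.find?_cons_of_pos (by simpa using hm)
      have hne : NE [(o, n)] := by intro p hpm; simp at hpm; rw [hpm]; exact ho
      rw [scanS_some hne hfind] at hp
      have hn : n <+: n ++ scanS [(o, n)] ((c :: t).drop o.length) := List.prefix_append _ _
      simpa using List.prefix_or_prefix_of_prefix hp hn
    · have hfind : ([(o, n)]).find? (fun p => p.1.isPrefixOf (c :: t)) = none := by
        rw [List.find?_eq_none]; intro p hpm; simp at hpm; rw [hpm]; simpa using hm
      rw [scanS_none hfind] at hp
      cases u with
      | nil => exact absurd rfl hu
      | cons d u' =>
        rw [List.cons_prefix_cons] at hp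
        obtain ⟨rfl, hp'⟩ := hp
        cases hu' : u' with
        | nil => left; simp
        | cons e u'' =>
          subst hu'
          rcases ih (e :: u'') (by simp) hp' with h | ⟨k, hk, h⟩
          · left; exact List.cons_prefix_cons.2 ⟨rfl, h⟩
          · right; exact ⟨k + 1, by simpa using Nat.succ_lt_succ hk, by simpa using h⟩

-- helper: prefixes of the same list are comparable, drop preserves prefix
theorem prefix_drop {p l : List Char} (h : p <+: l) {j : Nat} (hj : j ≤ p.length) :
    p.drop j <+: l.drop j := by
  obtain ⟨s, rfl⟩ := h
  rw [List.drop_append_of_le_length hj]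
  exact List.prefix_append _ _

-- find? is preserved when the found element still matches and failures still fail
theorem find?_transfer {α : Type} (f g : α → Bool) :
    ∀ (R : List α) (a : α), R.find? f = some a → g a = true →
      (∀ x ∈ R, f x = false → g x = false) → R.find? g = some a := by
  intro R
  induction R with
  | nil => intro a h; simp at h
  | cons b R ih =>
    intro a h hga hfg
    by_cases hb : f b = true
    · rw [List.find?_cons_of_pos hb] at h
      injection h with h; subst h
      exact List.find?_cons_of_pos hga
    · have hb' : f b = false := by simpa using hb
      rw [List.find?_cons_of_neg (by simp [hb'])] at h
      have hgb : g b = false := hfg b (by simp) hb'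
      rw [List.find?_cons_of_neg (by simp [hgb])]
      exact ih a h hga (fun x hx => hfg x (by simp [hx]))

-- the step lemma: scanning with (o,n)::R = one (o,n) pass, then scanning with R
theorem scan_step {o n : List Char} {R : List (List Char × List Char)}
    (hg : goodB ((o, n) :: R) = true) :
    ∀ l, scanS ((o, n) :: R) l = scanS R (scanS [(o, n)] l) := by
  have hgb := hg
  simp only [goodB, Bool.and_eq_true] at hgb
  have ho : o ≠ [] := by simpa [List.isEmpty_iff] using hgb.1.1.1.1
  have hn : n ≠ [] := by simpa [List.isEmpty_iff] using hgb.1.1.1.2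
  have hc : clearB n (R.map (·.1)) = true := hgb.1.1.2
  have h3 : hyp3B o n (R.map (·.1)) = true := hgb.1.2
  have hne : NE ((o, n) :: R) := good_NE hg
  have hneR : NE R := fun p hp => hne p (List.mem_cons_of_mem _ hp)
  have hne1 : NE [(o, n)] := by intro p hpm; simp at hpm; rw [hpm]; exact ho
  have hol : 1 ≤ o.length := by
    cases o with | nil => exact absurd rfl ho | cons _ _ => simp
  have main : ∀ m l, l.length ≤ m → scanS ((o, n) :: R) l = scanS R (scanS [(o, n)] l) := by
    intro m
    induction m with
    | zero =>
      intro l hl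
      have : l = [] := List.eq_nil_of_length_eq_zero (Nat.le_zero.1 hl)
      subst this; rfl
    | succ m ih =>
      intro l hl
      cases l with
      | nil => rfl
      | cons c t =>
        simp only [List.length_cons] at hl
        by_cases hm : o.isPrefixOf (c :: t)
        · -- head rule fires at position 0 in both sides
          have hfind1 : ([(o, n)]).find? (fun p => p.1.isPrefixOf (c :: t)) = some (o, n) :=
            List.find?_cons_of_pos (by simpa using hm)
          have hfindC : (((o, n) :: R)).find? (fun p => p.1.isPrefixOf (c :: t)) = some (o, n) :=
            List.find?_cons_of_pos (by simpa using hm)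
          rw [scanS_some hne hfindC, scanS_some hne1 hfind1, scan_through hc]
          congr 1
          exact ih _ (by simp only [List.length_drop, List.length_cons]; omega)
        · have hm' : ¬ o <+: (c :: t) := by simpa [List.isPrefixOf_iff_prefix] using hm
          have hfind1 : ([(o, n)]).find? (fun p => p.1.isPrefixOf (c :: t)) = none := by
            rw [List.find?_eq_none]; intro p hpm; simp at hpm; rw [hpm]; simpa using hm
          cases hfR : R.find? (fun p => p.1.isPrefixOf (c :: t)) with
          | some r =>
            obtain ⟨p, q⟩ := r
            have hpmem : (p, q) ∈ R := List.mem_of_find?_eq_some hfR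
            have hppat : p ∈ R.map (·.1) := List.mem_map_of_mem hpmem
            have hpfx : p <+: c :: t := by
              have := List.find?_some hfR
              simpa [List.isPrefixOf_iff_prefix] using this
            have hpne : p ≠ [] := hneR (p, q) hpmem
            have hpl : 1 ≤ p.length := by
              cases p with | nil => exact absurd rfl hpne | cons _ _ => simp
            have hplen : p.length ≤ (c :: t).length := hpfx.length_le
            -- no occurrence of o within the first |p| characters
            have hnoocc : ∀ j < p.length, ¬ o <+: (c :: t).drop j := by
              intro j hj hoj
              cases j with
              | zero => exact hm' (by simpa using hoj)
              | succ j' =>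
                have hpd : p.drop (j' + 1) <+: (c :: t).drop (j' + 1) :=
                  prefix_drop hpfx (by omega)
                have hcmp := List.prefix_or_prefix_of_prefix hoj hpd
                have := (hyp3B_spec h3 hppat (k := j' + 1) (by omega) hj).1
                rcases hcmp with h | h
                · exact this.1 h
                · exact this.2 h
            -- the single-rule pass copies the first |p| characters verbatim
            have hinner : scanS [(o, n)] (c :: t)
                = p ++ scanS [(o, n)] ((c :: t).drop p.length) := by
              rw [scan_skip ho p.length (c :: t) hplen hnoocc]
              congr 1
              exact (List.prefix_iff_eq_take.1 hpfx).symm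
            -- R finds the same rule on the scanned string
            have hfind2 : R.find? (fun pr => pr.1.isPrefixOf (scanS [(o, n)] (c :: t)))
                = some (p, q) := by
              refine find?_transfer _ _ R (p, q) hfR ?_ ?_
              · rw [hinner]
                simpa [List.isPrefixOf_iff_prefix] using List.prefix_append p _
              · intro x hx hfx
                simp only [← Bool.not_eq_true, List.isPrefixOf_iff_prefix] at hfx ⊢
                intro hxpre
                rw [hinner] at hxpre
                have hp2 : p <+: p ++ scanS [(o, n)] ((c :: t).drop p.length) :=
                  List.prefix_append _ _
                by_cases hlen : x.1.length ≤ p.length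
                · exact hfx ((List.prefix_of_prefix_length_le hxpre hp2 hlen).trans hpfx)
                · have hpx : p <+: x.1 :=
                    List.prefix_of_prefix_length_le hp2 hxpre (by omega)
                  obtain ⟨r, hxr⟩ := hpx
                  have hrY : r <+: scanS [(o, n)] ((c :: t).drop p.length) := by
                    rw [← hxr] at hxpre
                    exact (List.prefix_append_right_inj p).1 hxpre
                  have hrdrop : x.1.drop p.length = r := by
                    rw [← hxr, List.drop_append_of_le_length (le_refl p.length),
                      List.drop_length, List.nil_append]
                  have hrne : r ≠ [] := by
                    intro hre
                    rw [hre, List.append_nil] at hxr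
                    exact hlen (by rw [← hxr])
                  rcases scan_prefix ho _ r hrne hrY with h | ⟨k, hk, h⟩
                  · -- then x.1 is a prefix of c :: t after all
                    apply hfx
                    obtain ⟨s, hs⟩ := h
                    refine ⟨s, ?_⟩
                    rw [← hxr, List.append_assoc, hs]
                    exact List.prefix_iff_eq_append.1 hpfx
                  · have hkk : p.length + k < x.1.length := by
                      rw [← hxr]; simp only [List.length_append]
                      omega
                    have hdd : x.1.drop (p.length + k) = r.drop k := by
                      rw [← List.drop_drop, hrdrop]
                    have hx3 := (hyp3B_spec h3 (List.mem_map_of_mem hx)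
                      (k := p.length + k) (by omega) hkk).2
                    rw [hdd] at hx3
                    rcases h with h | h
                    · exact hx3.2 h
                    · exact hx3.1 h
            have hdrop : (scanS [(o, n)] (c :: t)).drop p.length
                = scanS [(o, n)] ((c :: t).drop p.length) := by
              rw [hinner, List.drop_append_of_le_length (le_refl p.length)]
              simp
            have hfindC : (((o, n) :: R)).find? (fun pr => pr.1.isPrefixOf (c :: t))
                = some (p, q) := by
              rw [List.find?_cons_of_neg (by simpa using hm)]
              exact hfR
            rw [scanS_some hne hfindC, scanS_some hneR hfind2, hdrop]
            congr 1
            exact ih _ (by simp only [List.length_drop, List.length_cons]; omega)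
          | none =>
            -- no rule fires at position 0 on either side
            have hfindC : (((o, n) :: R)).find? (fun pr => pr.1.isPrefixOf (c :: t)) = none := by
              rw [List.find?_cons_of_neg (by simpa using hm)]
              exact hfR
            have hinner : scanS [(o, n)] (c :: t) = c :: scanS [(o, n)] t :=
              scanS_none hfind1
            have hfind2 : R.find? (fun pr => pr.1.isPrefixOf (scanS [(o, n)] (c :: t)))
                = none := by
              rw [List.find?_eq_none]
              intro x hx
              simp only [← Bool.not_eq_true, List.isPrefixOf_iff_prefix]
              intro hxpre
              have hxne : x.1 ≠ [] := hneR x hx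
              rcases scan_prefix ho _ _ hxne hxpre with h | ⟨k, hk, h⟩
              · have := List.find?_eq_none.1 hfR x hx
                exact absurd (by simpa [List.isPrefixOf_iff_prefix] using h) (by simpa using this)
              · cases k with
                | zero =>
                  simp only [List.drop_zero] at h
                  have hnl : 0 < n.length := by
                    cases n with | nil => exact absurd rfl hn | cons _ _ => simp
                  have hcl := clearB_spec hc (List.mem_map_of_mem hx) (k := 0) hnl
                  simp only [List.drop_zero] at hcl
                  rcases h with h | h
                  · exact hcl.1 h
                  · exact hcl.2 h
                | succ k' =>
                  have hx3 := (hyp3B_spec h3 (List.mem_map_of_mem hx)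
                    (k := k' + 1) (by omega) hk).2
                  rcases h with h | h
                  · exact hx3.2 h
                  · exact hx3.1 h
            have hfind2' : R.find? (fun pr => pr.1.isPrefixOf (c :: scanS [(o, n)] t))
                = none := by rw [← hinner]; exact hfind2
            rw [scanS_none hfindC, hinner, scanS_none hfind2']
            exact congrArg (List.cons c)
              (ih t (by simpa using Nat.succ_le_succ_iff.1 hl))
  intro l
  exact main l.length l (le_refl _)

-- main theorem: the fold of replace passes = one multi-pattern scan
theorem fold_eq_scan {R : List (List Char × List Char)} (hg : goodB R = true) (l : List Char) :
    R.foldl (fun s p => PySem.Chars.replace s p.1 p.2) l = scanS R l := by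
  induction R generalizing l with
  | nil => simp [scanS_empty_rules]
  | cons r R ih =>
    obtain ⟨o, nw⟩ := r
    have ho : o ≠ [] := good_NE hg (o, nw) (by simp)
    rw [List.foldl_cons, ih (good_tail hg), replace_eq_scan nw l ho, scan_step hg]

-- the per-category rule lists, at the String level (A's pass order = B's priority order)
def LSkin : List (String × String) :=
  pvSkinColors.map (fun h => (h, "SKIN_PLACEHOLDER"))
    ++ [("${color}", "SKIN_PLACEHOLDER"), ("${color}", "#929598")]
def LFacial : List (String × String) := [("${color}", "HAIR_PLACEHOLDER"), ("${color}", "#929598")]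
def LTop : List (String × String) :=
  [("${hairColor}", "HAIR_PLACEHOLDER"), ("${hatColor}", "#262E33")]
    ++ pvSkinColors.map (fun h => (h, "SKIN_PLACEHOLDER")) ++ [("${color}", "#929598")]
def LAcc : List (String × String) := [("${color}", "#929598"), ("${color}", "#929598")]
def LGen : List (String × String) := [("${color}", "#929598")]

-- String-level fold of replaces = char-level fold of replaces
theorem fold_str (L : List (String × String)) :
    ∀ s : String, L.foldl (fun r p => PySem.Str.replace r p.1 p.2) s
      = String.ofList ((L.map (fun p => (p.1.toList, p.2.toList))).foldl
          (fun cs p => PySem.Chars.replace cs p.1 p.2) s.toList) := by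
  induction L with
  | nil => intro s; simp [String.ofList_toList]
  | cons r L ih =>
    intro s
    rw [List.foldl_cons, ih, List.map_cons, List.foldl_cons, PySem.Str.toList_replace]

-- fold of replace passes = B's scanner, for a good rule list
theorem case_gen (L : List (String × String))
    (hg : goodB (L.map fun p => (p.1.toList, p.2.toList)) = true) (s : String) :
    L.foldl (fun r p => PySem.Str.replace r p.1 p.2) s
      = String.ofList (pvScanGo (L.map fun p => (p.1.toList, p.2.toList)) s.toList.length s.toList) := by
  rw [fold_str, fold_eq_scan hg]
  rfl

-- ===== VERDICT =====
theorem apply_color_replacements_spec : Claim_equal_apply_color_replacements := by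
  intro svg cat _
  unfold Spec_apply_color_replacements
  by_cases h1 : cat = "skin"
  · subst h1
    have hA : apply_color_replacements svg "skin"
        = LSkin.foldl (fun r p => PySem.Str.replace r p.1 p.2) svg := by
      simp [apply_color_replacements, LSkin, pvSkinColors]
    have hr : (pvCategoryRules.getD "skin" []) ++ [("${color}", "#929598")] = LSkin := by decide
    have hB : apply_color_replacements_alt svg "skin"
        = String.ofList (pvScanGo (LSkin.map fun p => (p.1.toList, p.2.toList))
            svg.toList.length svg.toList) := by
      simp only [apply_color_replacements_alt, hr]
    rw [hA, hB, case_gen LSkin (by decide)]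
  · by_cases h2 : cat = "facialHair"
    · subst h2
      have hA : apply_color_replacements svg "facialHair"
          = LFacial.foldl (fun r p => PySem.Str.replace r p.1 p.2) svg := by
        simp [apply_color_replacements, LFacial]
      have hr : (pvCategoryRules.getD "facialHair" []) ++ [("${color}", "#929598")] = LFacial := by
        decide
      have hB : apply_color_replacements_alt svg "facialHair"
          = String.ofList (pvScanGo (LFacial.map fun p => (p.1.toList, p.2.toList))
              svg.toList.length svg.toList) := by
        simp only [apply_color_replacements_alt, hr]
      rw [hA, hB, case_gen LFacial (by decide)]
    · by_cases h3 : cat = "top"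
      · subst h3
        have hA : apply_color_replacements svg "top"
            = LTop.foldl (fun r p => PySem.Str.replace r p.1 p.2) svg := by
          simp [apply_color_replacements, LTop, pvSkinColors]
        have hr : (pvCategoryRules.getD "top" []) ++ [("${color}", "#929598")] = LTop := by decide
        have hB : apply_color_replacements_alt svg "top"
            = String.ofList (pvScanGo (LTop.map fun p => (p.1.toList, p.2.toList))
                svg.toList.length svg.toList) := by
          simp only [apply_color_replacements_alt, hr]
        rw [hA, hB, case_gen LTop (by decide)]
      · by_cases h4 : cat = "accessories"
        · subst h4
          have hA : apply_color_replacements svg "accessories"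
              = LAcc.foldl (fun r p => PySem.Str.replace r p.1 p.2) svg := by
            simp [apply_color_replacements, LAcc]
          have hr : (pvCategoryRules.getD "accessories" []) ++ [("${color}", "#929598")]
              = LAcc := by decide
          have hB : apply_color_replacements_alt svg "accessories"
              = String.ofList (pvScanGo (LAcc.map fun p => (p.1.toList, p.2.toList))
                  svg.toList.length svg.toList) := by
            simp only [apply_color_replacements_alt, hr]
          rw [hA, hB, case_gen LAcc (by decide)]
        · have hA : apply_color_replacements svg cat
              = LGen.foldl (fun r p => PySem.Str.replace r p.1 p.2) svg := by
            simp [apply_color_replacements, LGen, h1, h2, h3, h4]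
          have hr : (pvCategoryRules.getD cat []) = [] := by
            simp [pvCategoryRules, PySem.Dict.getD, PySem.Dict.get?,
              Ne.symm h1, Ne.symm h2, Ne.symm h3, Ne.symm h4]
          have hB : apply_color_replacements_alt svg cat
              = String.ofList (pvScanGo (LGen.map fun p => (p.1.toList, p.2.toList))
                  svg.toList.length svg.toList) := by
            simp only [apply_color_replacements_alt, hr, List.nil_append]
            rfl
          rw [hA, hB, case_gen LGen (by decide)]
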